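-- pv_equiv track=rewrite | github.com/ihgazni2/dlixhict-didactic | xdict/elist.py | index_whichnot
-- ===== SOURCE A (Python) =====
-- def index_whichnot(ol,value,which):
--     '''
--         from xdict.elist import *
--         ol = [1,'a',3,'a',4,'a',5]
--         index_whichnot(ol,'a',0)
--         index_whichnot(ol,'a',1)
--         index_whichnot(ol,'a',2)
--     '''
--     length = ol.__len__()
--     seq = -1
--     for i in range(0,length):
--         if(value == ol[i]):
--             pass
--         else:
--             seq = seq + 1
--             if(seq == which):
--                 return(i)
--             else:
--                 pass
--     return(None)
-- ===== SOURCE B (Python) =====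
-- def index_whichnot(ol, value, which):
--     positions = [i for i, x in enumerate(ol) if not (value == x)]
--     return positions[which] if 0 <= which < len(positions) else None
-- ===== Notes on version B (the rewrite author's own statement) =====
-- stated objective: simpler
-- what changed: Replaces the running-counter loop with an early return by building the full list of qualifying indices in one comprehension and indexing it by rank with an explicit 0 <= which < len guard.
import Mathlib
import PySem

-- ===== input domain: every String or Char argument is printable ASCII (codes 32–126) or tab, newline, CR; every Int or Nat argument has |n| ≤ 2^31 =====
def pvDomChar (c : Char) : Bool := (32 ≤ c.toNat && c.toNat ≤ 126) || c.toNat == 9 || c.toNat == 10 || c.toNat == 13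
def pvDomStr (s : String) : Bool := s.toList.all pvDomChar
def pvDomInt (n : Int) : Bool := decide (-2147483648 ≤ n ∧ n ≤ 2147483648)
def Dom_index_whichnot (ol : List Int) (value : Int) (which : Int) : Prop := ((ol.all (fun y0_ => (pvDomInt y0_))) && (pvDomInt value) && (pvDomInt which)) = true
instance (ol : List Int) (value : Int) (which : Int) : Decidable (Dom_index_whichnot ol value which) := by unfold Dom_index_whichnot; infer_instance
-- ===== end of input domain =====

-- B builds the list of qualifying indices once and indexes it by rank (guarded); same return value as A, no speed claim.
-- ===== PORT A =====
-- the for-loop over range(0,length): remaining list, current index i, running counter seq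
def index_whichnot_go (value which : Int) : List Int → Int → Int → Option Int
  | [], _, _ => none
  | x :: rest, i, seq =>
    if value == x then index_whichnot_go value which rest (i + 1) seq
    else
      let seq' := seq + 1
      if seq' == which then some i else index_whichnot_go value which rest (i + 1) seq'

def index_whichnot (ol : List Int) (value : Int) (which : Int) : Option Int :=
  index_whichnot_go value which ol 0 (-1)

-- ===== PORT B =====
def index_whichnot_alt (ol : List Int) (value : Int) (which : Int) : Option Int :=
  let positions : List Int :=
    ((PySem.List.enumerate ol).filter (fun p => !(value == p.2))).map (fun p => p.1)
  if 0 ≤ which ∧ which < positions.length then PySem.List.pyGet? positions which else none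

-- ===== PRECONDITION & SPEC =====
def Spec_index_whichnot (ol : List Int) (value : Int) (which : Int) (out : Option Int) : Prop := out = index_whichnot_alt ol value which
instance (ol : List Int) (value : Int) (which : Int) (out : Option Int) : Decidable (Spec_index_whichnot ol value which out) := by unfold Spec_index_whichnot; infer_instance

-- ===== CLAIM (what is proved, stated in full; the proofs are below) =====
def Claim_equal_index_whichnot : Prop := ∀ (ol : List Int) (value : Int) (which : Int), Dom_index_whichnot ol value which → Spec_index_whichnot ol value which (index_whichnot ol value which)

-- ===== LEMMAS AND PROOFS =====

-- ===== VERDICT (by name: the statement is the Claim_ definition above) =====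
-- absolute indices (offset i) of elements of l not equal to value
def posList (value : Int) : List Int → Int → List Int
  | [], _ => []
  | x :: rest, i =>
    if value == x then posList value rest (i + 1) else i :: posList value rest (i + 1)

def pyGetOpt (l : List Int) (k : Int) : Option Int :=
  if 0 ≤ k ∧ k < l.length then l[k.toNat]? else none

lemma pyGetOpt_cons (a : Int) (l : List Int) (k : Int) (hk : k ≠ 0) :
    pyGetOpt (a :: l) k = pyGetOpt l (k - 1) := by
  unfold pyGetOpt
  by_cases h : 0 ≤ k - 1 ∧ k - 1 < l.length
  · have h0 : 0 ≤ k ∧ k < (a :: l).length := by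
      simp only [List.length_cons]; omega
    rw [if_pos h0, if_pos h]
    have : k.toNat = (k - 1).toNat + 1 := by omega
    rw [this, List.getElem?_cons_succ]
  · have h0 : ¬ (0 ≤ k ∧ k < (a :: l).length) := by
      simp only [List.length_cons]; omega
    rw [if_neg h0, if_neg h]

lemma go_eq_posList (value which : Int) (l : List Int) (i seq : Int) :
    index_whichnot_go value which l i seq = pyGetOpt (posList value l i) (which - seq - 1) := by
  induction l generalizing i seq with
  | nil => simp [index_whichnot_go, posList, pyGetOpt]
  | cons x rest ih =>
    simp only [index_whichnot_go, posList]
    by_cases hv : value == x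
    · simp only [hv, if_true]
      exact ih (i + 1) seq
    · simp only [hv, if_false, Bool.false_eq_true]
      by_cases hw : seq + 1 = which
      · have : which - seq - 1 = 0 := by omega
        simp [hw, this, pyGetOpt]
      · have hne : (seq + 1 == which) = false := by simp [hw]
        rw [hne]
        simp only [Bool.false_eq_true, if_false]
        rw [ih, pyGetOpt_cons _ _ _ (by omega)]
        ring_nf

lemma posList_eq_positions (value : Int) (l : List Int) (s : Int) :
    posList value l s =
      ((PySem.List.enumerate l s).filter (fun p => !(value == p.2))).map (fun p => p.1) := by
  induction l generalizing s with
  | nil => simp [posList, PySem.List.enumerate_nil]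
  | cons x rest ih =>
    rw [PySem.List.enumerate_cons]
    simp only [posList, List.filter_cons]
    by_cases hv : value == x
    · simp [hv, ih]
    · simp [hv, ih]

-- ===== VERDICT (by name: the statement is the Claim_ definition above) =====
-- absolute indices (offset i) of elements of l not equal to value
-- ===== VERDICT (by name: the statement is the Claim_ definition above) =====
theorem index_whichnot_spec : Claim_equal_index_whichnot := by
  intro ol value which _
  unfold Spec_index_whichnot index_whichnot index_whichnot_alt
  rw [go_eq_posList]
  have h := posList_eq_positions value ol 0
  simp only [← h]
  have : which - (-1) - 1 = which := by ring
  rw [this]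
  unfold pyGetOpt
  split_ifs with hg
  · rw [PySem.List.pyGet?_of_nonneg _ hg.1]
  · rfl
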